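-- pv_equiv track=rewrite | github.com/phiberoptik112/drawings_to_acoustics_processor | src/calculations/image_table_to_csv.py | normalize_rows_to_rectangular
-- ===== SOURCE A (Python) =====
-- from typing import List, Tuple, Optional
--
-- def normalize_rows_to_rectangular(table_rows: List[List[str]]) -> List[List[str]]:
--     if not table_rows:
--         return table_rows
--     max_cols = max(len(r) for r in table_rows)
--     normalized: List[List[str]] = []
--     for r in table_rows:
--         row = list(r)
--         if len(row) < max_cols:
--             row.extend([""] * (max_cols - len(row)))
--         normalized.append(row)
--     return normalized
-- ===== SOURCE B (Python) =====
-- from itertools import zip_longest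
-- from typing import List
--
-- def normalize_rows_to_rectangular(table_rows: List[List[str]]) -> List[List[str]]:
--     if not table_rows or not any(table_rows):
--         return [list(r) for r in table_rows]
--     columns = zip_longest(*table_rows, fillvalue="")
--     return [list(row) for row in zip(*columns)]
-- ===== Notes on version B (the rewrite author's own statement) =====
-- stated objective: idiomatic
-- what changed: B pads rows column-wise via a zip_longest transpose and a zip re-transpose instead of computing the max width and extending each row in a loop.
import Mathlib
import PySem

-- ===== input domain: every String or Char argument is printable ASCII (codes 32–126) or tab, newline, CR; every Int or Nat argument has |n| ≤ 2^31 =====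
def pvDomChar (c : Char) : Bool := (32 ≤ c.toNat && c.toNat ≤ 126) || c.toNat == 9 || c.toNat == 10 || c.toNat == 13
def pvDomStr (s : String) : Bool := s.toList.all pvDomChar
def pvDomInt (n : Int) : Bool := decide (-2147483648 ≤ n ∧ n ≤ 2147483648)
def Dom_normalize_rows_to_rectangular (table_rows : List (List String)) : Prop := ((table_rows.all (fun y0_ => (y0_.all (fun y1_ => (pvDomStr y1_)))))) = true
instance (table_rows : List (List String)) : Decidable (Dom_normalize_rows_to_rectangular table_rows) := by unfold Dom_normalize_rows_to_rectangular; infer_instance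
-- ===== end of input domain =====

-- B pads rows to the max width by a zip_longest transpose and a zip re-transpose
-- (column-wise traversal) instead of A's max-width scan plus per-row extension; same
-- return value, objective: idiomatic/alternative decomposition.

-- ===== PORT A =====
def normalize_rows_to_rectangular (table_rows : List (List String)) : List (List String) :=
  if table_rows.isEmpty then table_rows
  else
    let max_cols : Int := (PySem.List.max? (table_rows.map (fun r => (r.length : Int))) (fun x => x)).getD 0
    table_rows.foldl (fun normalized r =>
      let row := r
      let row := if (row.length : Int) < max_cols
                 then row ++ List.replicate (max_cols - (row.length : Int)).toNat ""
                 else row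
      normalized ++ [row]) []

-- ===== PORT B =====
-- termination helper for zipLongest (cited by name in decreasing_by)
theorem pvSumTail_lt (rows : List (List String)) (h : rows.all (·.isEmpty) = false) :
    ((rows.map List.tail).map List.length).sum < (rows.map List.length).sum := by
  induction rows with
  | nil => simp at h
  | cons r t ih =>
    simp only [List.all_cons, Bool.and_eq_false_iff] at h
    rcases h with h | h
    · have hr : r ≠ [] := by cases r <;> simp_all
      have hle : ∀ (l : List (List String)),
          ((l.map List.tail).map List.length).sum ≤ (l.map List.length).sum := by
        intro l; induction l with
        | nil => simp
        | cons a b ihb =>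
          simp only [List.map_cons, List.sum_cons]
          have : a.tail.length ≤ a.length := by cases a <;> simp
          omega
      have := hle t
      have hrl : r.tail.length < r.length := by cases r with
        | nil => simp_all
        | cons x xs => simp
      simp only [List.map_cons, List.sum_cons]; omega
    · have := ih h
      have hle : r.tail.length ≤ r.length := by cases r <;> simp
      simp only [List.map_cons, List.sum_cons]; omega

def pvTails (rows : List (List String)) : List (List String) := rows.map List.tail

-- port of itertools.zip_longest(*rows, fillvalue="") : list of columns
def pvZipLongest (rows : List (List String)) : List (List String) :=
  if h : rows.all (·.isEmpty) then []
  else (rows.map (fun r => r.headD "")) :: pvZipLongest (pvTails rows)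
termination_by (rows.map List.length).sum
decreasing_by
  simpa [pvTails] using pvSumTail_lt rows (by simpa using h)

-- port of zip(*cols) : stops as soon as some column is exhausted
def pvZipBack (cols : List (List String)) : List (List String) :=
  if cols.isEmpty then []
  else if cols.any (·.isEmpty) then []
  else (cols.map (fun c => c.headD "")) :: pvZipBack (pvTails cols)
termination_by (cols.headD []).length
decreasing_by
  cases cols with
  | nil => simp_all
  | cons c cs =>
    rename_i h1 h2
    simp only [List.any_cons, Bool.or_eq_true, not_or] at h2
    cases c with
    | nil => simp_all
    | cons x xs => simp [pvTails]

def normalize_rows_to_rectangular_alt (table_rows : List (List String)) : List (List String) :=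
  if table_rows.isEmpty || table_rows.all (·.isEmpty) then table_rows.map (fun r => r)
  else pvZipBack (pvZipLongest table_rows)

-- ===== PRECONDITION & SPEC =====
def Spec_normalize_rows_to_rectangular (table_rows : List (List String)) (out : List (List String)) : Prop := out = normalize_rows_to_rectangular_alt table_rows
instance (table_rows : List (List String)) (out : List (List String)) : Decidable (Spec_normalize_rows_to_rectangular table_rows out) := by unfold Spec_normalize_rows_to_rectangular; infer_instance

-- ===== CLAIM (what is proved, stated in full; the proofs are below) =====
def Claim_equal_normalize_rows_to_rectangular : Prop := ∀ (table_rows : List (List String)), Dom_normalize_rows_to_rectangular table_rows → Spec_normalize_rows_to_rectangular table_rows (normalize_rows_to_rectangular table_rows)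

-- ===== LEMMAS AND PROOFS =====

def pvMaxLen (rows : List (List String)) : Nat := (rows.map List.length).foldl max 0

theorem pvLe_foldl_max (l : List Nat) (a : Nat) : a ≤ l.foldl max a := by
  induction l generalizing a with
  | nil => simp
  | cons x t ih => exact le_trans (le_max_left a x) (ih _)

theorem pvMem_le_foldl_max (l : List Nat) (a x : Nat) (hx : x ∈ l) : x ≤ l.foldl max a := by
  induction l generalizing a with
  | nil => simp at hx
  | cons y t ih =>
    rcases List.mem_cons.mp hx with rfl | h
    · exact le_trans (le_max_right a x) (pvLe_foldl_max _ _)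
    · exact ih _ h

theorem pvLen_le_maxLen (rows : List (List String)) (r : List String) (h : r ∈ rows) :
    r.length ≤ pvMaxLen rows := pvMem_le_foldl_max _ _ _ (List.mem_map_of_mem h)

theorem pvFoldl_max_cast (t : List (List String)) (a : Nat) :
    (t.map (fun x => (x.length : Int))).foldl max (a : Int)
      = (((t.map List.length).foldl max a : Nat) : Int) := by
  induction t generalizing a with
  | nil => simp
  | cons x l ih => simpa [Nat.cast_max] using ih (max a x.length)

theorem pvFoldl_max_pred (l : List Nat) (a : Nat) :
    (l.map (fun n => n - 1)).foldl max (a - 1) = l.foldl max a - 1 := by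
  induction l generalizing a with
  | nil => simp
  | cons x t ih =>
    simp only [List.map_cons, List.foldl_cons]
    rw [show max (a - 1) (x - 1) = max a x - 1 by omega]
    exact ih _

theorem pvMaxLen_tail (rows : List (List String)) :
    pvMaxLen (rows.map List.tail) = pvMaxLen rows - 1 := by
  unfold pvMaxLen
  have : (rows.map List.tail).map List.length = (rows.map List.length).map (fun n => n - 1) := by
    simp only [List.map_map]; apply List.map_congr_left; intro r _
    cases r <;> simp
  rw [this, ← pvFoldl_max_pred]

theorem pvMaxLen_pos (rows : List (List String)) (h : rows.all (·.isEmpty) = false) :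
    1 ≤ pvMaxLen rows := by
  simp only [List.all_eq_false] at h
  rcases h with ⟨r, hr, hne⟩
  have : r.length ≤ pvMaxLen rows := pvLen_le_maxLen rows r hr
  cases r with
  | nil => simp at hne
  | cons x xs => simp at this ⊢; omega

theorem pvMaxLen_all_empty (rows : List (List String)) (h : rows.all (·.isEmpty) = true) :
    pvMaxLen rows = 0 := by
  induction rows with
  | nil => simp [pvMaxLen]
  | cons r t ih =>
    simp only [List.all_cons, Bool.and_eq_true] at h
    have hr : r = [] := by cases r <;> simp_all
    subst hr
    simpa [pvMaxLen] using ih h.2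

theorem pvZipLongest_length (rows : List (List String)) :
    (pvZipLongest rows).length = pvMaxLen rows := by
  fun_induction pvZipLongest rows with
  | case1 rows h => simp [pvMaxLen_all_empty rows h]
  | case2 rows h ih =>
    have h2 := pvMaxLen_pos rows (by simpa using h)
    have h1 : pvMaxLen (pvTails rows) = pvMaxLen rows - 1 := by
      simpa [pvTails] using pvMaxLen_tail rows
    simp only [List.length_cons, ih, h1]
    omega

theorem pvZipLongest_col_length (rows : List (List String)) (c : List String)
    (hc : c ∈ pvZipLongest rows) : c.length = rows.length := by
  fun_induction pvZipLongest rows with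
  | case1 rows h => simp_all
  | case2 rows h ih =>
    rcases List.mem_cons.mp hc with rfl | h2
    · simp
    · simp only [pvTails] at ih h2
      simpa using ih h2

theorem pvZipLongest_get (rows : List (List String)) (j : Nat)
    (h : j < (pvZipLongest rows).length) :
    (pvZipLongest rows)[j] = rows.map (fun r => r.getD j "") := by
  fun_induction pvZipLongest rows generalizing j with
  | case1 rows hh => simp at h
  | case2 rows hh ih =>
    cases j with
    | zero =>
      simp only [List.getElem_cons_zero]
      apply List.map_congr_left; intro r _; cases r <;> simp [List.getD]
    | succ j =>
      simp only [pvTails] at ih ⊢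
      simp only [List.getElem_cons_succ]
      rw [ih j (by simpa using h), List.map_map]
      apply List.map_congr_left; intro r _; cases r <;> simp [List.getD]

theorem pvZipBack_eq (n : Nat) (cols : List (List String)) (hne : cols ≠ [])
    (hlen : ∀ c ∈ cols, c.length = n) :
    pvZipBack cols = (List.range n).map (fun i => cols.map (fun c => c.getD i "")) := by
  induction n generalizing cols with
  | zero =>
    rcases cols with _ | ⟨c, cs⟩
    · simp at hne
    · have hc : c.isEmpty := by
        have := hlen c (by simp); cases c <;> simp_all
      rw [pvZipBack]; simp [hc]
  | succ n ih =>
    have hanyf : cols.any (·.isEmpty) = false := by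
      simp only [List.any_eq_false]; intro c hc
      have := hlen c hc
      cases c with
      | nil => simp at this
      | cons x xs => simp
    have h0 : cols.isEmpty = false := by cases cols <;> simp_all
    rw [pvZipBack]
    simp only [h0, hanyf, Bool.false_eq_true, if_false]
    have hne' : cols.map List.tail ≠ [] := by cases cols <;> simp_all
    have hlen' : ∀ c ∈ cols.map List.tail, c.length = n := by
      intro c hc'
      rcases List.mem_map.mp hc' with ⟨d, hd, rfl⟩
      have hdl := hlen d hd
      cases d with
      | nil => simp at hdl
      | cons x xs => simpa using hdl
    rw [show pvTails cols = cols.map List.tail from rfl, ih _ hne' hlen']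
    rw [List.range_succ_eq_map]
    simp only [List.map_cons, List.map_map]
    congr 1
    · apply List.map_congr_left; intro c _; cases c <;> simp [List.getD]
    · apply List.map_congr_left; intro i _
      simp only [Function.comp]
      apply List.map_congr_left; intro c _; cases c <;> simp [List.getD]

theorem pvFoldl_snoc (rows : List (List String)) (f : List String → List String)
    (acc : List (List String)) :
    rows.foldl (fun n r => n ++ [f r]) acc = acc ++ rows.map f := by
  induction rows generalizing acc with
  | nil => simp
  | cons r t ih => simp [ih]

theorem pvA_eq (rows : List (List String)) (hne : rows ≠ []) :
    normalize_rows_to_rectangular rows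
      = rows.map (fun r => r ++ List.replicate (pvMaxLen rows - r.length) "") := by
  unfold normalize_rows_to_rectangular
  rcases rows with _ | ⟨r, t⟩
  · simp at hne
  · simp only [List.isEmpty_cons, Bool.false_eq_true, if_false]
    have hmax : (PySem.List.max? ((r :: t).map (fun x => (x.length : Int))) (fun x => x)).getD 0
        = (pvMaxLen (r :: t) : Int) := by
      simp only [List.map_cons]
      rw [PySem.List.max?_id_cons]
      simp only [Option.getD_some]
      rw [pvFoldl_max_cast t r.length]
      simp [pvMaxLen]
    rw [hmax, pvFoldl_snoc ((r :: t))
      (fun x => if (x.length : Int) < (pvMaxLen (r :: t) : Int)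
                then x ++ List.replicate (((pvMaxLen (r :: t) : Int) - (x.length : Int)).toNat) ""
                else x) []]
    simp only [List.nil_append]
    apply List.map_congr_left
    intro x hx
    have hle : x.length ≤ pvMaxLen (r :: t) := pvLen_le_maxLen _ _ hx
    by_cases hlt : x.length < pvMaxLen (r :: t)
    · rw [if_pos (by exact_mod_cast hlt)]
      congr 1
      congr 1
      omega
    · have : x.length = pvMaxLen (r :: t) := by omega
      rw [if_neg (by exact_mod_cast hlt)]
      simp [this]

theorem pvPad_eq (M : Nat) (r : List String) (h : r.length ≤ M) :
    (List.range M).map (fun j => r.getD j "") = r ++ List.replicate (M - r.length) "" := by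
  apply List.ext_getElem
  · simp; omega
  · intro j h1 h2
    simp only [List.getElem_map, List.getElem_range]
    rw [List.getElem_append]
    split
    · rename_i hj
      simp [List.getD, List.getElem?_eq_getElem hj]
    · rename_i hj
      simp only [List.getElem_replicate]
      simp [List.getD, List.getElem?_eq_none (by omega : r.length ≤ j)]

theorem pvB_eq (rows : List (List String)) (hne : rows ≠ [])
    (hall : rows.all (·.isEmpty) = false) :
    pvZipBack (pvZipLongest rows)
      = rows.map (fun r => r ++ List.replicate (pvMaxLen rows - r.length) "") := by
  have hM1 : 1 ≤ pvMaxLen rows := pvMaxLen_pos rows hall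
  have hcne : pvZipLongest rows ≠ [] := by
    intro h0
    have := pvZipLongest_length rows
    rw [h0] at this; simp at this; omega
  rw [pvZipBack_eq rows.length (pvZipLongest rows) hcne
      (fun c hc => pvZipLongest_col_length rows c hc)]
  apply List.ext_getElem
  · simp
  · intro i h1 h2
    have hi : i < rows.length := by simpa using h2
    simp only [List.getElem_map, List.getElem_range]
    rw [← pvPad_eq (pvMaxLen rows) (rows[i]'hi) (pvLen_le_maxLen rows _ (List.getElem_mem hi))]
    apply List.ext_getElem
    · simp [pvZipLongest_length]
    · intro j hj1 hj2
      simp only [List.getElem_map, List.getElem_range]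
      rw [pvZipLongest_get rows j (by simpa using hj1)]
      simp [List.getD, List.getElem?_map, List.getElem?_eq_getElem hi]

theorem pvAll_empty_A (rows : List (List String)) (hne : rows ≠ [])
    (hall : rows.all (·.isEmpty) = true) :
    rows.map (fun r => r ++ List.replicate (pvMaxLen rows - r.length) "") = rows := by
  rw [pvMaxLen_all_empty rows hall]
  conv_rhs => rw [← List.map_id rows]
  apply List.map_congr_left
  intro r hr
  have := List.all_eq_true.mp hall r hr
  cases r <;> simp_all

-- ===== VERDICT (by name: the statement is the Claim_ definition above) =====
theorem normalize_rows_to_rectangular_spec : Claim_equal_normalize_rows_to_rectangular := by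
  intro rows _
  unfold Spec_normalize_rows_to_rectangular normalize_rows_to_rectangular_alt
  by_cases hne : rows = []
  · subst hne; simp [normalize_rows_to_rectangular]
  · have h0 : rows.isEmpty = false := by cases rows <;> simp_all
    by_cases hall : rows.all (·.isEmpty) = true
    · simp only [h0, hall, Bool.false_or, if_true]
      rw [pvA_eq rows hne, pvAll_empty_A rows hne hall, List.map_id']
    · have hall' : rows.all (·.isEmpty) = false := by simpa using hall
      simp only [h0, hall', Bool.false_or, Bool.false_eq_true, if_false]
      rw [pvA_eq rows hne, pvB_eq rows hne hall']
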